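-- pv_equiv track=rewrite | github.com/HakAl/synopsi | synopsi-worker/ingestion/main.py | _is_rss_feed
-- ===== SOURCE A (Python) =====
-- def _is_rss_feed(url: str) -> bool:
--     """
--     Determine if a URL is an RSS/Atom feed or a regular web page.
--     Checks for common RSS indicators in the URL.
--
--     Args:
--         url: URL to check
--
--     Returns:
--         True if URL appears to be an RSS feed, False otherwise
--     """
--     url_lower = url.lower()
--
--     # Common RSS/Atom indicators
--     rss_indicators = [
--         '/rss',
--         '/feed',
--         '/atom',
--         '.rss',
--         '.xml',
--         'rss.xml',
--         'feed.xml',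
--         'atom.xml',
--     ]
--
--     return any(indicator in url_lower for indicator in rss_indicators)
-- ===== SOURCE B (Python) =====
-- def _is_rss_feed(url: str) -> bool:
--     """One left-to-right scan: a feed URL is one where '/' is followed by
--     rss/feed/atom or '.' is followed by rss/xml (the rss.xml/feed.xml/atom.xml
--     indicators are all subsumed by '.xml')."""
--     u = url.lower()
--     for i, c in enumerate(u):
--         if c == '/':
--             if u.startswith('rss', i + 1) or u.startswith('feed', i + 1) or u.startswith('atom', i + 1):
--                 return True
--         elif c == '.':
--             if u.startswith('rss', i + 1) or u.startswith('xml', i + 1):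
--                 return True
--     return False
-- ===== Notes on version B (the rewrite author's own statement) =====
-- stated objective: alternative
-- what changed: Replaces the any-over-eight-substrings membership loop with a single left-to-right scan that, at each '/' or '.', checks whether the matching keyword (rss/feed/atom after '/', rss/xml after '.') starts right after it; the redundant rss.xml/feed.xml/atom.xml indicators are subsumed by '.xml'.
import Mathlib
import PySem

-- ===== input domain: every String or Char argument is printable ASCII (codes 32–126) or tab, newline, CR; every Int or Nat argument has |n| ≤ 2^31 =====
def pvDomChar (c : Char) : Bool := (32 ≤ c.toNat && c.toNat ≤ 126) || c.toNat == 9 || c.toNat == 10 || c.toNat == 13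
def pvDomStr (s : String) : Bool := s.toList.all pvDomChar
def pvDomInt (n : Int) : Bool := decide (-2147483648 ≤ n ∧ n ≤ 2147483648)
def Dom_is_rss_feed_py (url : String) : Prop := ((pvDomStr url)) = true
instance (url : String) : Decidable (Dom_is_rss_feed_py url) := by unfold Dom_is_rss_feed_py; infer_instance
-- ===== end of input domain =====

-- B replaces the eight-substring `any` with one left-to-right scan that looks at each
-- '/' or '.' and checks the keyword that may follow (the *.xml indicators are subsumed
-- by '.xml'); objective: alternative (single pass over the string, no speed claim).


-- ===== PORT A =====
def is_rss_feed_py (url : String) : Bool :=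
  let url_lower := PySem.Str.lower url
  let rss_indicators : List String :=
    ["/rss", "/feed", "/atom", ".rss", ".xml", "rss.xml", "feed.xml", "atom.xml"]
  rss_indicators.any (fun indicator => PySem.Str.isIn indicator url_lower)

-- ===== PORT B =====
-- the scan of Source B: at each position, if the char is '/' or '.', test whether the
-- matching keyword starts right after it (u.startswith(kw, i+1) = startswith on the rest)
def rssScan : List Char → Bool
  | [] => false
  | c :: rest =>
    if c = '/' then
      (PySem.Chars.startswith rest "rss".toList || PySem.Chars.startswith rest "feed".toList
        || PySem.Chars.startswith rest "atom".toList) || rssScan rest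
    else if c = '.' then
      (PySem.Chars.startswith rest "rss".toList || PySem.Chars.startswith rest "xml".toList)
        || rssScan rest
    else rssScan rest

def is_rss_feed_py_alt (url : String) : Bool :=
  rssScan (PySem.Str.lower url).toList

-- ===== PRECONDITION & SPEC =====
def Spec_is_rss_feed_py (url : String) (out : Bool) : Prop := out = is_rss_feed_py_alt url
instance (url : String) (out : Bool) : Decidable (Spec_is_rss_feed_py url out) := by unfold Spec_is_rss_feed_py; infer_instance

-- ===== CLAIM (what is proved, stated in full; the proofs are below) =====
def Claim_equal_is_rss_feed_py : Prop := ∀ (url : String), Dom_is_rss_feed_py url → Spec_is_rss_feed_py url (is_rss_feed_py url)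

-- ===== LEMMAS AND PROOFS =====

-- the scan fires exactly when one of the five irredundant patterns occurs as an infix
lemma rssScan_iff (s : List Char) : rssScan s = true ↔
    ('/' :: "rss".toList) <:+: s ∨ ('/' :: "feed".toList) <:+: s ∨ ('/' :: "atom".toList) <:+: s
      ∨ ('.' :: "rss".toList) <:+: s ∨ ('.' :: "xml".toList) <:+: s := by
  induction s with
  | nil => simp [rssScan]
  | cons c rest ih =>
    by_cases hs : c = '/'
    · subst hs
      simp [rssScan, PySem.Chars.startswith_iff, ih, List.infix_cons_iff,
        List.cons_prefix_cons]
      tauto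
    · by_cases hd : c = '.'
      · subst hd
        simp [rssScan, PySem.Chars.startswith_iff, ih, List.infix_cons_iff,
          List.cons_prefix_cons]
        tauto
      · have hs' : ¬ ('/' = c) := fun h => hs h.symm
        have hd' : ¬ ('.' = c) := fun h => hd h.symm
        simp [rssScan, hs, hd, hs', hd', ih, List.infix_cons_iff, List.cons_prefix_cons]

-- ===== VERDICT (by name: the statement is the Claim_ definition above) =====
theorem is_rss_feed_py_spec : Claim_equal_is_rss_feed_py := by
  intro url _
  show is_rss_feed_py url = is_rss_feed_py_alt url
  rw [Bool.eq_iff_iff]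
  unfold is_rss_feed_py is_rss_feed_py_alt
  simp only [List.any_cons, List.any_nil, Bool.or_eq_true, Bool.false_eq_true, or_false,
    PySem.Str.isIn_eq, PySem.Chars.isIn_iff_infix, rssScan_iff]
  constructor
  · rintro (h | h | h | h | h | h | h | h)
    · exact Or.inl h
    · exact Or.inr (Or.inl h)
    · exact Or.inr (Or.inr (Or.inl h))
    · exact Or.inr (Or.inr (Or.inr (Or.inl h)))
    · exact Or.inr (Or.inr (Or.inr (Or.inr h)))
    · exact Or.inr (Or.inr (Or.inr (Or.inr (List.IsInfix.trans (by decide) h))))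
    · exact Or.inr (Or.inr (Or.inr (Or.inr (List.IsInfix.trans (by decide) h))))
    · exact Or.inr (Or.inr (Or.inr (Or.inr (List.IsInfix.trans (by decide) h))))
  · rintro (h | h | h | h | h)
    · exact Or.inl h
    · exact Or.inr (Or.inl h)
    · exact Or.inr (Or.inr (Or.inl h))
    · exact Or.inr (Or.inr (Or.inr (Or.inl h)))
    · exact Or.inr (Or.inr (Or.inr (Or.inr (Or.inl h))))
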